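-- pv_equiv track=rewrite | github.com/tiuweehan/mininet_cubic_bbr_dumbbell | run.py | generate_flows_rec
-- ===== SOURCE A (Python) =====
-- def generate_flows_rec(groups, combinations):
--     s = set()
--     if groups == 0:
--         s.add('')
--         return s
--
--     prev = generate_flows_rec(groups - 1, combinations)
--     for c in combinations:
--         for p in prev:
--             s.add(c + p)
--
--     return sorted(s)
-- ===== SOURCE B (Python) =====
-- def generate_flows_rec(groups, combinations):
--     if groups == 0:
--         return {''}
--     s = {''}
--     for _ in range(groups):
--         s = {c + p for c in combinations for p in s}
--     return sorted(s)
-- ===== Notes on version B (the rewrite author's own statement) =====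
-- stated objective: simpler
-- what changed: Replaced A's recursion (which sorts the set at every level) by an iterative accumulator that rebuilds one set per level with a set comprehension and sorts once at the end.
-- outside the precondition, e.g. on generate_flows_rec(0, ['a']): A returns {''}, B returns {''}; on generate_flows_rec(-1, ['a']): A raises RecursionError, B returns ['']
import Mathlib
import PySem

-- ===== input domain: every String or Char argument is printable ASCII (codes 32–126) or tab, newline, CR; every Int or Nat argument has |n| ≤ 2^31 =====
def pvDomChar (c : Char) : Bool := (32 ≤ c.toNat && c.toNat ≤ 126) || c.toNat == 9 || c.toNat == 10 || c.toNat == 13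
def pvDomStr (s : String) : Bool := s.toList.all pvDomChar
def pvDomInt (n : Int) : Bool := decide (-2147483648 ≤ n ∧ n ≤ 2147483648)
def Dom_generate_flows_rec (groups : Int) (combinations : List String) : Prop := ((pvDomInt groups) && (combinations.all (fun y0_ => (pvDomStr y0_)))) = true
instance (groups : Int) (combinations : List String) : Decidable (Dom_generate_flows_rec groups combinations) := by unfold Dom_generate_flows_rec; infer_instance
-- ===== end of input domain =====

-- B replaces A's recursion by an iterative accumulator (one set rebuilt per level, sorted once at the end); objective: simpler.

-- ===== PORT A =====
def generate_flows_rec (groups : Int) (combinations : List String) : List String :=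
  if groups = 0 then
    PySem.Set.add PySem.Set.empty ""           -- s = set(); s.add(''); return s
  else if groups < 0 then
    []  -- totality guard only: Python recurses without end here (RecursionError); excluded by Pre_
  else
    let prev := generate_flows_rec (groups - 1) combinations
    let s := combinations.foldl
      (fun s c => prev.foldl (fun s p => PySem.Set.add s (c ++ p)) s) PySem.Set.empty
    PySem.List.sorted s (fun x => x) false
termination_by groups.toNat
decreasing_by omega

-- ===== PORT B =====
def generate_flows_rec_alt (groups : Int) (combinations : List String) : List String :=
  if groups = 0 then
    [""]                                        -- return {''}
  else
    let s := (PySem.List.pyRange 0 groups 1).foldl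
      (fun s _ => PySem.Set.ofList (combinations.flatMap (fun c => s.map (fun p => c ++ p)))) [""]
    PySem.List.sorted s (fun x => x) false

-- ===== PRECONDITION & SPEC =====
-- Pre_ excludes negative groups (Python A recurses without end: RecursionError) and groups = 0,
-- where A returns a set instead of the declared list (B does the same there).
def Pre_generate_flows_rec (groups : Int) (combinations : List String) : Prop := 0 < groups
instance (groups : Int) (combinations : List String) : Decidable (Pre_generate_flows_rec groups combinations) := by unfold Pre_generate_flows_rec; infer_instance
def pvWitness_generate_flows_rec : Int × List String := (2, ["a", "b"])

def Spec_generate_flows_rec (groups : Int) (combinations : List String) (out : List String) : Prop := out = generate_flows_rec_alt groups combinations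
instance (groups : Int) (combinations : List String) (out : List String) : Decidable (Spec_generate_flows_rec groups combinations out) := by unfold Spec_generate_flows_rec; infer_instance

-- ===== CLAIM (what is proved, stated in full; the proofs are below) =====
def Claim_equal_generate_flows_rec : Prop := ∀ (groups : Int) (combinations : List String), Dom_generate_flows_rec groups combinations → Pre_generate_flows_rec groups combinations → Spec_generate_flows_rec groups combinations (generate_flows_rec groups combinations)
-- ===== LEMMAS AND PROOFS =====

-- One level of B: the set {c + p | c in combinations, p in s}.
def pvStep (cs : List String) (s : List String) : List String :=
  PySem.Set.ofList (cs.flatMap (fun c => s.map (fun p => c ++ p)))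

theorem pvMem_step (cs s : List String) (y : String) :
    y ∈ pvStep cs s ↔ ∃ c ∈ cs, ∃ p ∈ s, y = c ++ p := by
  simp only [pvStep, PySem.Set.mem_ofList, List.mem_flatMap, List.mem_map]
  constructor
  · rintro ⟨c, hc, p, hp, rfl⟩; exact ⟨c, hc, p, hp, rfl⟩
  · rintro ⟨c, hc, p, hp, rfl⟩; exact ⟨c, hc, p, hp, rfl⟩

theorem pvNodup_step (cs s : List String) : (pvStep cs s).Nodup :=
  PySem.Set.nodup_ofList _

theorem pvFoldl_const (cs : List String) (l : List Int) (init : List String) :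
    l.foldl (fun s _ => pvStep cs s) init = (pvStep cs)^[l.length] init := by
  induction l generalizing init with
  | nil => rfl
  | cons x xs ih => simp [List.foldl_cons, ih, Function.iterate_succ_apply]

theorem pvMemA_fold (cs prev : List String) (s0 : List String) (y : String) :
    y ∈ cs.foldl (fun s c => prev.foldl (fun s p => PySem.Set.add s (c ++ p)) s) s0 ↔
      y ∈ s0 ∨ ∃ c ∈ cs, ∃ p ∈ prev, y = c ++ p := by
  induction cs generalizing s0 with
  | nil => simp
  | cons c cs ih =>
    rw [List.foldl_cons, ih]
    rw [PySem.Set.mem_foldl_add]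
    simp only [List.mem_cons]
    constructor
    · rintro (⟨h | ⟨p, hp, rfl⟩⟩ | ⟨c', hc', p, hp, rfl⟩)
      · exact Or.inl h
      · exact Or.inr ⟨c, Or.inl rfl, p, hp, rfl⟩
      · exact Or.inr ⟨c', Or.inr hc', p, hp, rfl⟩
    · rintro (h | ⟨c', hc' | hc', p, hp, rfl⟩)
      · exact Or.inl (Or.inl h)
      · exact Or.inl (Or.inr ⟨p, hp, by rw [hc']⟩)
      · exact Or.inr ⟨c', hc', p, hp, rfl⟩

theorem pvNodupA_fold (cs prev : List String) (s0 : List String) (h : s0.Nodup) :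
    (cs.foldl (fun s c => prev.foldl (fun s p => PySem.Set.add s (c ++ p)) s) s0).Nodup := by
  induction cs generalizing s0 with
  | nil => exact h
  | cons c cs ih =>
    rw [List.foldl_cons, ← PySem.Set.update_map_eq_foldl_add]
    exact ih _ (PySem.Set.nodup_update _ _ h)

theorem pvIter_nodup (cs : List String) (n : Nat) : ((pvStep cs)^[n] [""]).Nodup := by
  cases n with
  | zero => simp
  | succ n => rw [Function.iterate_succ_apply']; exact pvNodup_step _ _

theorem pvA_zero (cs : List String) : generate_flows_rec 0 cs = [""] := by
  rw [generate_flows_rec]; rfl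

theorem pvA_succ (cs : List String) (n : Nat) :
    generate_flows_rec ((n : Int) + 1) cs =
      PySem.List.sorted
        (cs.foldl (fun s c => (generate_flows_rec (n : Int) cs).foldl
            (fun s p => PySem.Set.add s (c ++ p)) s) PySem.Set.empty)
        (fun x => x) false := by
  rw [generate_flows_rec]
  have h1 : ¬ ((n : Int) + 1 = 0) := by omega
  have h2 : ¬ ((n : Int) + 1 < 0) := by omega
  simp only [h1, h2, if_false]
  norm_num

theorem pvA_mem_iter (cs : List String) (n : Nat) : ∀ y : String,
    y ∈ generate_flows_rec (n : Int) cs ↔ y ∈ (pvStep cs)^[n] [""] := by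
  induction n with
  | zero => intro y; rw [Nat.cast_zero, pvA_zero]; simp
  | succ n ih =>
    intro y
    rw [Nat.cast_succ, pvA_succ, PySem.List.mem_sorted, pvMemA_fold,
      Function.iterate_succ_apply', pvMem_step]
    simp only [PySem.Set.empty, List.not_mem_nil, false_or]
    constructor
    · rintro ⟨c, hc, p, hp, rfl⟩; exact ⟨c, hc, p, (ih p).1 hp, rfl⟩
    · rintro ⟨c, hc, p, hp, rfl⟩; exact ⟨c, hc, p, (ih p).2 hp, rfl⟩

-- ===== VERDICT (by name: the statement is the Claim_ definition above) =====
theorem generate_flows_rec_spec : Claim_equal_generate_flows_rec := by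
  intro groups cs _ hpre
  unfold Spec_generate_flows_rec
  have hp : 0 < groups := hpre
  obtain ⟨n, rfl⟩ : ∃ n : Nat, groups = (n : Int) + 1 :=
    ⟨(groups - 1).toNat, by omega⟩
  rw [pvA_succ, generate_flows_rec_alt]
  have h1 : ¬ ((n : Int) + 1 = 0) := by omega
  simp only [h1, if_false]
  have hlen : (PySem.List.pyRange 0 ((n : Int) + 1) 1).length = n + 1 := by
    rw [PySem.List.length_pyRange_one]; omega
  have hfold : (PySem.List.pyRange 0 ((n : Int) + 1) 1).foldl
      (fun s _ => PySem.Set.ofList (cs.flatMap (fun c => s.map (fun p => c ++ p)))) [""]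
      = (pvStep cs)^[n + 1] [""] := by
    rw [show (fun (s : List String) (_ : Int) =>
          PySem.Set.ofList (cs.flatMap (fun c => s.map (fun p => c ++ p))))
        = (fun s _ => pvStep cs s) from rfl]
    rw [pvFoldl_const, hlen]
  rw [hfold]
  apply PySem.List.sorted_eq_sorted_of_perm _ _ _ (fun _ _ h => h)
  rw [List.perm_ext_iff_of_nodup (pvNodupA_fold _ _ _ (by simp [PySem.Set.empty]))
    (pvIter_nodup cs (n + 1))]
  intro y
  rw [pvMemA_fold, Function.iterate_succ_apply', pvMem_step]
  simp only [PySem.Set.empty, List.not_mem_nil, false_or]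
  constructor
  · rintro ⟨c, hc, p, hp, rfl⟩; exact ⟨c, hc, p, (pvA_mem_iter cs n p).1 hp, rfl⟩
  · rintro ⟨c, hc, p, hp, rfl⟩; exact ⟨c, hc, p, (pvA_mem_iter cs n p).2 hp, rfl⟩
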